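-- pv_equiv track=rewrite | github.com/pypi-data/pypi-mirror-390 | packages/quickhooks/quickhooks-0.2.0.tar.gz/quickhooks-0.2.0/hooks/smart_tts_reader.py | summarize_code_block
-- ===== SOURCE A (Python) =====
-- def summarize_code_block(lang: str, code: str) -> str:
--     """Create a brief summary of code block"""
--     lines = code.strip().split('\n')
--     line_count = len(lines)
--
--     # Detect content type
--     characteristics = []
--
--     if lang.lower() in ['python', 'py']:
--         if any('def ' in line for line in lines):
--             func_count = sum(1 for line in lines if line.strip().startswith('def '))
--             if func_count == 1:
--                 characteristics.append("a function")
--             else: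
--                 characteristics.append(f"{func_count} functions")
--         if any('class ' in line for line in lines):
--             class_count = sum(1 for line in lines if line.strip().startswith('class '))
--             if class_count == 1:
--                 characteristics.append("a class")
--             else:
--                 characteristics.append(f"{class_count} classes")
--
--     elif lang.lower() in ['javascript', 'js', 'typescript', 'ts']:
--         if any('function ' in line or '=>' in line for line in lines):
--             characteristics.append("functions")
--         if any('class ' in line for line in lines):
--             characteristics.append("classes")
--
--     elif lang.lower() in ['bash', 'sh', 'shell']:
--         characteristics.append("shell commands")
--
--     # Build natural summary
--     summary = f"{lang or 'code'} block with {line_count} lines"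
--     if characteristics:
--         summary += f" containing {', '.join(characteristics)}"
--
--     return f"[{summary}]"
-- ===== SOURCE B (Python) =====
-- # B restructures A: one language-agnostic statistics pass over the lines first,
-- # then a dict-based language-family normalization, then a data-driven report
-- # built by filtering declarative feature tables against those statistics.
--
-- _FAMILY = {'python': 'py', 'py': 'py',
--            'javascript': 'js', 'js': 'js', 'typescript': 'js', 'ts': 'js',
--            'bash': 'sh', 'sh': 'sh', 'shell': 'sh'}
--
--
-- def summarize_code_block(lang: str, code: str) -> str:
--     """Create a brief summary of code block."""
--     lines = code.strip().split('\n')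
--
--     # Stage 1: gather all statistics in one pass, independent of the language.
--     has_def = has_class = has_jsfunc = False
--     def_count = class_count = 0
--     for line in lines:
--         stripped = line.strip()
--         if 'def ' in line:
--             has_def = True
--         if stripped.startswith('def '):
--             def_count += 1
--         if 'class ' in line:
--             has_class = True
--         if stripped.startswith('class '):
--             class_count += 1
--         if 'function ' in line or '=>' in line:
--             has_jsfunc = True
--
--     # Stage 2: normalize the language to a family via a table.
--     fam = _FAMILY.get(lang.lower())
--
--     # Stage 3: build the characteristics from declarative feature tables.
--     if fam == 'py':
--         chars = [sing if n == 1 else f"{n} " + plur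
--                  for present, n, sing, plur in ((has_def, def_count, "a function", "functions"),
--                                                 (has_class, class_count, "a class", "classes"))
--                  if present]
--     elif fam == 'js':
--         chars = [name for present, name in ((has_jsfunc, "functions"), (has_class, "classes"))
--                  if present]
--     elif fam == 'sh':
--         chars = ["shell commands"]
--     else:
--         chars = []
--
--     summary = f"{lang or 'code'} block with {len(lines)} lines"
--     if chars:
--         summary += " containing " + ", ".join(chars)
--     return f"[{summary}]"
-- ===== Notes on version B (the rewrite author's own statement) =====
-- stated objective: alternative
-- what changed: B restructures A's interleaved dispatch-then-scan branches into three separated stages: one language-agnostic statistics pass over the lines, a dict-based normalization of the language to a family, and a report built by filtering declarative feature tables against the gathered statistics.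
import Mathlib
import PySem

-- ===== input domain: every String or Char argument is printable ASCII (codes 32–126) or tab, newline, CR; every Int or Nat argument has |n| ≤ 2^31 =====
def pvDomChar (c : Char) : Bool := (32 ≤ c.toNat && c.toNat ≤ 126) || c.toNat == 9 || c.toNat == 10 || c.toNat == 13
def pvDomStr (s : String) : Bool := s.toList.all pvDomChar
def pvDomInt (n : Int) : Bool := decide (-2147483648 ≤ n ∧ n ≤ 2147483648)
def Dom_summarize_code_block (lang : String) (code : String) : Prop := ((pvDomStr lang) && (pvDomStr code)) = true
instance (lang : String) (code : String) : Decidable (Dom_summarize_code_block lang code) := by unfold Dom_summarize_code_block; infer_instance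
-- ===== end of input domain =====

-- B replaces A's interleaved dispatch-then-scan branches by three separated stages (one language-agnostic
-- statistics pass, dict-based family normalization, declarative feature tables); same result, alternative structure.

-- ===== PORT A =====
def summarize_code_block (lang : String) (code : String) : String :=
  let lines := PySem.Chars.splitOn (PySem.Chars.strip code.toList) ['\n']
  let line_count : Int := PySem.List.len lines
  let characteristics : List String :=
    if ["python", "py"].contains (PySem.Str.lower lang) then
      (if lines.any (fun line => PySem.Chars.isIn "def ".toList line) then
        let func_count : Int :=
          ((lines.filter (fun line => PySem.Chars.startswith (PySem.Chars.strip line) "def ".toList)).map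
            (fun _ => (1 : Int))).sum
        if func_count = 1 then ["a function"]
        else [PySem.Int.toStr func_count ++ " functions"]
      else []) ++
      (if lines.any (fun line => PySem.Chars.isIn "class ".toList line) then
        let class_count : Int :=
          ((lines.filter (fun line => PySem.Chars.startswith (PySem.Chars.strip line) "class ".toList)).map
            (fun _ => (1 : Int))).sum
        if class_count = 1 then ["a class"]
        else [PySem.Int.toStr class_count ++ " classes"]
      else [])
    else if ["javascript", "js", "typescript", "ts"].contains (PySem.Str.lower lang) then
      (if lines.any (fun line => PySem.Chars.isIn "function ".toList line || PySem.Chars.isIn "=>".toList line) then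
        ["functions"] else []) ++
      (if lines.any (fun line => PySem.Chars.isIn "class ".toList line) then ["classes"] else [])
    else if ["bash", "sh", "shell"].contains (PySem.Str.lower lang) then ["shell commands"]
    else []
  let summary := (if lang = "" then "code" else lang) ++ " block with " ++
                 PySem.Int.toStr line_count ++ " lines"
  let summary := if characteristics.isEmpty then summary
                 else summary ++ " containing " ++ PySem.Str.join ", " characteristics
  "[" ++ summary ++ "]"

-- ===== PORT B =====
-- module-level _FAMILY table of Source B
def famDict : PySem.Dict String String :=
  PySem.Dict.ofList [("python", "py"), ("py", "py"),
                     ("javascript", "js"), ("js", "js"), ("typescript", "js"), ("ts", "js"),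
                     ("bash", "sh"), ("sh", "sh"), ("shell", "sh")]

-- stage-1 loop body of Source B: state (has_def, def_count, has_class, class_count, has_jsfunc)
def scanStep (st : Bool × Int × Bool × Int × Bool) (line : List Char) : Bool × Int × Bool × Int × Bool :=
  let stripped := PySem.Chars.strip line
  let st := if PySem.Chars.isIn "def ".toList line then (true, st.2.1, st.2.2) else st
  let st := if PySem.Chars.startswith stripped "def ".toList then (st.1, st.2.1 + 1, st.2.2) else st
  let st := if PySem.Chars.isIn "class ".toList line then (st.1, st.2.1, true, st.2.2.2) else st
  let st := if PySem.Chars.startswith stripped "class ".toList then (st.1, st.2.1, st.2.2.1, st.2.2.2.1 + 1, st.2.2.2.2) else st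
  if PySem.Chars.isIn "function ".toList line || PySem.Chars.isIn "=>".toList line then
    (st.1, st.2.1, st.2.2.1, st.2.2.2.1, true)
  else st

def summarize_code_block_alt (lang : String) (code : String) : String :=
  let lines := PySem.Chars.splitOn (PySem.Chars.strip code.toList) ['\n']
  -- Stage 1: one language-agnostic statistics pass
  let st := lines.foldl scanStep (false, 0, false, 0, false)
  -- Stage 2: normalize the language to a family via the table
  let fam := PySem.Dict.get? famDict (PySem.Str.lower lang)
  -- Stage 3: filter declarative feature tables against the statistics
  let chars : List String :=
    if fam = some "py" then
      (([(st.1, st.2.1, "a function", "functions"),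
         (st.2.2.1, st.2.2.2.1, "a class", "classes")].filter (fun t => t.1)).map
        (fun t => if t.2.1 = 1 then t.2.2.1 else (PySem.Int.toStr t.2.1 ++ " ") ++ t.2.2.2))
    else if fam = some "js" then
      (([(st.2.2.2.2, "functions"), (st.2.2.1, "classes")].filter (fun t => t.1)).map (fun t => t.2))
    else if fam = some "sh" then ["shell commands"]
    else []
  let summary := (if lang = "" then "code" else lang) ++ " block with " ++
                 PySem.Int.toStr (PySem.List.len lines) ++ " lines"
  let summary := if chars.isEmpty then summary
                 else summary ++ " containing " ++ PySem.Str.join ", " chars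
  "[" ++ summary ++ "]"

-- ===== PRECONDITION & SPEC =====
def Spec_summarize_code_block (lang : String) (code : String) (out : String) : Prop := out = summarize_code_block_alt lang code
instance (lang : String) (code : String) (out : String) : Decidable (Spec_summarize_code_block lang code out) := by unfold Spec_summarize_code_block; infer_instance

-- ===== CLAIM (what is proved, stated in full; the proofs are below) =====
def Claim_equal_summarize_code_block : Prop := ∀ (lang : String) (code : String), Dom_summarize_code_block lang code → Spec_summarize_code_block lang code (summarize_code_block lang code)

-- ===== LEMMAS AND PROOFS =====
theorem app_space_assoc (s t : String) : (s ++ " ") ++ t = s ++ (" " ++ t) := by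
  rw [String.append_assoc]

theorem scanStep_eq (st : Bool × Int × Bool × Int × Bool) (line : List Char) :
    scanStep st line =
      (st.1 || PySem.Chars.isIn "def ".toList line,
       st.2.1 + (if PySem.Chars.startswith (PySem.Chars.strip line) "def ".toList then 1 else 0),
       st.2.2.1 || PySem.Chars.isIn "class ".toList line,
       st.2.2.2.1 + (if PySem.Chars.startswith (PySem.Chars.strip line) "class ".toList then 1 else 0),
       st.2.2.2.2 || (PySem.Chars.isIn "function ".toList line || PySem.Chars.isIn "=>".toList line)) := by
  unfold scanStep
  split_ifs <;> simp_all

theorem scanFold_spec (lines : List (List Char)) (b1 : Bool) (c1 : Int) (b2 : Bool) (c2 : Int) (b3 : Bool) :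
    lines.foldl scanStep (b1, c1, b2, c2, b3) =
      (b1 || lines.any (fun line => PySem.Chars.isIn "def ".toList line),
       c1 + ((lines.filter (fun line => PySem.Chars.startswith (PySem.Chars.strip line) "def ".toList)).map
              (fun _ => (1 : Int))).sum,
       b2 || lines.any (fun line => PySem.Chars.isIn "class ".toList line),
       c2 + ((lines.filter (fun line => PySem.Chars.startswith (PySem.Chars.strip line) "class ".toList)).map
              (fun _ => (1 : Int))).sum,
       b3 || lines.any (fun line => PySem.Chars.isIn "function ".toList line || PySem.Chars.isIn "=>".toList line)) := by
  induction lines generalizing b1 c1 b2 c2 b3 with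
  | nil => simp
  | cons l ls ih =>
    rw [List.foldl_cons, scanStep_eq, ih]
    simp only [List.any_cons, List.filter_cons]
    split_ifs <;> simp [Bool.or_assoc, add_assoc]

theorem fam_spec (lw : String) : PySem.Dict.get? famDict lw =
    if lw = "python" ∨ lw = "py" then some "py"
    else if lw = "javascript" ∨ lw = "js" ∨ lw = "typescript" ∨ lw = "ts" then some "js"
    else if lw = "bash" ∨ lw = "sh" ∨ lw = "shell" then some "sh" else none := by
  have h : famDict = PySem.Dict.mk [("python", "py"), ("py", "py"),
      ("javascript", "js"), ("js", "js"), ("typescript", "js"), ("ts", "js"),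
      ("bash", "sh"), ("sh", "sh"), ("shell", "sh")] := by decide
  rw [h]
  simp only [PySem.Dict.get?_mk_cons, beq_iff_eq]
  split_ifs <;> (try subst lw) <;> simp_all [PySem.Dict.get?, eq_comm]

-- the two stage-3 table builds of B equal A's branch-built characteristics, abstracted over the statistics
theorem main_chars (lw : String) (da ca ja : Bool) (dc cc : Int) :
    (if ["python", "py"].contains lw then
      (if da then (if dc = 1 then ["a function"] else [PySem.Int.toStr dc ++ " functions"]) else []) ++
      (if ca then (if cc = 1 then ["a class"] else [PySem.Int.toStr cc ++ " classes"]) else [])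
    else if ["javascript", "js", "typescript", "ts"].contains lw then
      (if ja then ["functions"] else []) ++ (if ca then ["classes"] else [])
    else if ["bash", "sh", "shell"].contains lw then ["shell commands"]
    else []) =
    (if PySem.Dict.get? famDict lw = some "py" then
      (([(da, dc, "a function", "functions"),
         (ca, cc, "a class", "classes")].filter (fun t => t.1)).map
        (fun t => if t.2.1 = 1 then t.2.2.1 else (PySem.Int.toStr t.2.1 ++ " ") ++ t.2.2.2))
    else if PySem.Dict.get? famDict lw = some "js" then
      (([(ja, "functions"), (ca, "classes")].filter (fun t => t.1)).map (fun t => t.2))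
    else if PySem.Dict.get? famDict lw = some "sh" then ["shell commands"]
    else []) := by
  rw [fam_spec]
  simp only [List.contains_eq_mem, List.mem_cons, List.not_mem_nil, or_false, decide_eq_true_eq,
    List.filter, app_space_assoc]
  split_ifs <;> simp_all

-- ===== VERDICT (by name: the statement is the Claim_ definition above) =====
theorem summarize_code_block_spec : Claim_equal_summarize_code_block := by
  intro lang code _
  unfold Spec_summarize_code_block summarize_code_block summarize_code_block_alt
  simp only [scanFold_spec, Bool.false_or, zero_add, main_chars]
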